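-- pv_equiv track=rewrite | github.com/Mr-76/some_py_stuff | find_middle_element.py | gimme
-- ===== SOURCE A (Python) =====
-- def gimme(array):
--     for index in range(len(array)):
--         if (index == 0):
--             maxx = array[0]
--             middle = array[0]
--             minim = array[0]
--             maxxindex = 0
--             minim_index = 0
--             continue
--
--         if (array[index] > maxx):
--             maxx = array[index]
--             maxxindex = index
--             continue
--
--         if (array[index] < minim):
--             minim = array[index]
--             minim_index = index
--
--
--     for index in range(len(array)):
--         if (index == maxxindex) or (index == minim_index):
--             continue
--         else:
--             return index
-- ===== SOURCE B (Python) =====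
-- def gimme(array):
--     n = len(array)
--     if n == 0:
--         return None
--     a0 = array[0]
--     # index 0 is neither the first-max nor the first-min index
--     # exactly when some element is strictly above a0 and some strictly below
--     if any(x > a0 for x in array) and any(x < a0 for x in array):
--         return 0
--     if n == 1:
--         return None
--     a1 = array[1]
--     # index 1 is the first-max index iff a1 beats a0 and dominates everything;
--     # symmetrically for first-min
--     ex1 = (a1 > a0 and all(x <= a1 for x in array)) or \
--           (a1 < a0 and all(x >= a1 for x in array))
--     if not ex1:
--         return 1
--     # both extremal indices are 0 and 1, so the answer is 2 if it exists
--     return 2 if n >= 3 else None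
-- ===== Notes on version B (the rewrite author's own statement) =====
-- stated objective: alternative
-- what changed: B never computes or scans for the extremal indices: it observes the answer can only be 0, 1, 2 or None, decides with any/all dominance predicates whether index 0 (and then index 1) is a first-extremum position, and returns the answer by closed-form case analysis instead of A's fused max/min index-tracking loop followed by an index scan.
import Mathlib
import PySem

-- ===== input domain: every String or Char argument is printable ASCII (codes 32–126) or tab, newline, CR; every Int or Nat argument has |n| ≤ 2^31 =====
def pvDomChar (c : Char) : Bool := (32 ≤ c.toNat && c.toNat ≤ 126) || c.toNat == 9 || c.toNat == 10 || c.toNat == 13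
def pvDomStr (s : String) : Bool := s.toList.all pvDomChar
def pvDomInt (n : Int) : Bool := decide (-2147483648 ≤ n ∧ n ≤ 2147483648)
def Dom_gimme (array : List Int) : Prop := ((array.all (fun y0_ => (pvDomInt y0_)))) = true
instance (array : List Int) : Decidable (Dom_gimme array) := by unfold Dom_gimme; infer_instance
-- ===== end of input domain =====

-- B replaces A's fused max/min index-tracking loop + index scan with a closed-form case
-- analysis (the answer is always 0, 1, 2 or none) decided by any/all dominance predicates
-- (objective: alternative; return value only, no mutation).

-- ===== PORT A =====
-- state = (maxx, middle, minim, maxxindex, minim_index); Python's variables are unset before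
-- index 0, modelled as `none` (the index == 0 branch is exactly the `none` case).
def gimmeStep (st : Option (Int × Int × Int × Int × Int)) (p : Int × Int) :
    Option (Int × Int × Int × Int × Int) :=
  match st with
  | none => some (p.2, p.2, p.2, 0, 0)
  | some (maxx, middle, minim, mxi, mni) =>
      if maxx < p.2 then some (p.2, middle, minim, p.1, mni)
      else if p.2 < minim then some (maxx, middle, p.2, mxi, p.1)
      else some (maxx, middle, minim, mxi, mni)

-- second loop: continue on the two indices, else return the index
def gimmeScan : List Int → Int → Int → Option Int
  | [], _, _ => none
  | i :: rest, mxi, mni => if i = mxi ∨ i = mni then gimmeScan rest mxi mni else some i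

def gimme (array : List Int) : Option Int :=
  match (PySem.List.enumerate array 0).foldl gimmeStep none with
  | none => none   -- empty array: second loop body never runs, function falls off the end
  | some (_, _, _, mxi, mni) => gimmeScan (PySem.List.pyRange 0 (array.length : Int) 1) mxi mni

-- ===== PORT B =====
def gimme_alt (array : List Int) : Option Int :=
  match array with
  | [] => none
  | a0 :: rest =>
    -- index 0 is neither the first-max nor the first-min index exactly when some element
    -- is strictly above a0 and some strictly below
    if array.any (fun x => a0 < x) && array.any (fun x => x < a0) then some 0
    else
      match rest with
      | [] => none
      | a1 :: _ =>
        -- index 1 is a first-extremum index iff a1 beats a0 and dominates everything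
        -- (or symmetrically for the minimum)
        let ex1 := (decide (a0 < a1) && array.all (fun x => x ≤ a1)) ||
                   (decide (a1 < a0) && array.all (fun x => a1 ≤ x))
        if !ex1 then some 1
        else if 3 ≤ array.length then some 2 else none

-- ===== PRECONDITION & SPEC =====
def Spec_gimme (array : List Int) (out : Option Int) : Prop := out = gimme_alt array
instance (array : List Int) (out : Option Int) : Decidable (Spec_gimme array out) := by unfold Spec_gimme; infer_instance

-- ===== CLAIM (what is proved, stated in full; the proofs are below) =====
def Claim_equal_gimme : Prop := ∀ (array : List Int), Dom_gimme array → Spec_gimme array (gimme array)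

-- ===== LEMMAS AND PROOFS =====

-- invariant of A's first loop: the fold state holds the max/min values and the first
-- indices where they occur
theorem fold_inv (x : Int) (t : List Int) :
    ∃ (M m : Int) (hk lk : Nat),
      (PySem.List.enumerate (x :: t) 0).foldl gimmeStep none
        = some (M, x, m, (hk : Int), (lk : Int)) ∧
      PySem.List.max? (x :: t) (fun y => y) = some M ∧
      PySem.List.min? (x :: t) (fun y => y) = some m ∧
      PySem.List.index? (x :: t) M = some hk ∧
      PySem.List.index? (x :: t) m = some lk := by
  induction t using List.reverseRecOn with
  | nil =>
      refine ⟨x, x, 0, 0, ?_, ?_, ?_, ?_, ?_⟩ <;>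
        simp [PySem.List.enumerate, gimmeStep, PySem.List.max?, PySem.List.min?,
              PySem.List.index?, List.idxOf?]
  | append_singleton t' y ih =>
      obtain ⟨M, m, hk, lk, hfold, hmax, hmin, hhi, hlo⟩ := ih
      have hMmem : M ∈ x :: t' := PySem.List.max?_mem hmax
      have hmmem : m ∈ x :: t' := PySem.List.min?_mem hmin
      have hMmax : ∀ z ∈ x :: t', z ≤ M := by
        intro z hz; exact PySem.List.max?_isMax hmax z hz
      have hmmin : ∀ z ∈ x :: t', m ≤ z := by
        intro z hz; exact PySem.List.min?_isMin hmin z hz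
      have hmM : m ≤ M := hmmin M hMmem
      have henum : PySem.List.enumerate (x :: (t' ++ [y])) 0
          = PySem.List.enumerate (x :: t') 0 ++ [(((x :: t').length : Int), y)] := by
        rw [← List.cons_append, PySem.List.enumerate_append]; simp
      have hfoldM : t'.foldl max x = M := by
        have h := PySem.List.max?_id_cons x t'
        rw [hmax] at h; exact (Option.some.injEq _ _).mp h.symm
      have hfoldm : t'.foldl min x = m := by
        have h := PySem.List.min?_id_cons x t'
        rw [hmin] at h; exact (Option.some.injEq _ _).mp h.symm
      have hmax' : PySem.List.max? (x :: (t' ++ [y])) (fun y => y) = some (max M y) := by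
        rw [PySem.List.max?_id_cons]; simp [List.foldl_append, hfoldM]
      have hmin' : PySem.List.min? (x :: (t' ++ [y])) (fun y => y) = some (min m y) := by
        rw [PySem.List.min?_id_cons]; simp [List.foldl_append, hfoldm]
      by_cases hgt : M < y
      · have hynot : y ∉ x :: t' := fun hy => absurd (hMmax y hy) (by omega)
        refine ⟨y, m, (x :: t').length, lk, ?_, ?_, ?_, ?_, ?_⟩
        · rw [henum, List.foldl_append, hfold]
          simp [gimmeStep, hgt]
        · rw [hmax']; simp [max_eq_right (le_of_lt hgt)]
        · rw [hmin']; simp [min_eq_left (by omega : m ≤ y)]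
        · rw [← List.cons_append]
          exact PySem.List.index?_append_singleton_self _ y hynot
        · rw [← List.cons_append, PySem.List.index?_append_of_mem _ hmmem]; exact hlo
      · by_cases hlt : y < m
        · have hynot : y ∉ x :: t' := fun hy => absurd (hmmin y hy) (by omega)
          refine ⟨M, y, hk, (x :: t').length, ?_, ?_, ?_, ?_, ?_⟩
          · rw [henum, List.foldl_append, hfold]
            simp [gimmeStep, hgt, hlt]
          · rw [hmax']; simp [max_eq_left (by omega : y ≤ M)]
          · rw [hmin']; simp [min_eq_right (le_of_lt hlt)]
          · rw [← List.cons_append, PySem.List.index?_append_of_mem _ hMmem]; exact hhi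
          · rw [← List.cons_append]
            exact PySem.List.index?_append_singleton_self _ y hynot
        · refine ⟨M, m, hk, lk, ?_, ?_, ?_, ?_, ?_⟩
          · rw [henum, List.foldl_append, hfold]
            simp [gimmeStep, hgt, hlt]
          · rw [hmax']; simp [max_eq_left (by omega : y ≤ M)]
          · rw [hmin']; simp [min_eq_left (by omega : m ≤ y)]
          · rw [← List.cons_append, PySem.List.index?_append_of_mem _ hMmem]; exact hhi
          · rw [← List.cons_append, PySem.List.index?_append_of_mem _ hmmem]; exact hlo

-- A's second loop over range(len(array)), characterised closed-form: the first index not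
-- among {hk, lk} is 0, 1 or 2 (or does not exist)
theorem gimmeScan_range (n hk lk : Nat) (hhk : hk < n) (hlk : lk < n) :
    gimmeScan (PySem.List.pyRange 0 (n : Int) 1) (hk : Int) (lk : Int) =
      if hk ≠ 0 ∧ lk ≠ 0 then some 0
      else if hk ≠ 1 ∧ lk ≠ 1 then (if n = 1 then none else some 1)
      else if 3 ≤ n then some 2 else none := by
  have h0n : (0 : Int) < (n : Int) := by exact_mod_cast (by omega : 0 < n)
  rw [PySem.List.pyRange_one_cons h0n]
  simp only [zero_add]
  by_cases h0 : hk ≠ 0 ∧ lk ≠ 0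
  · have : ¬((0 : Int) = (hk : Int) ∨ (0 : Int) = (lk : Int)) := by
      push_cast; omega
    simp [gimmeScan, this, h0]
  · have h0' : hk = 0 ∨ lk = 0 := by omega
    have hsk : ((0 : Int) = (hk : Int) ∨ (0 : Int) = (lk : Int)) := by
      rcases h0' with h | h <;> simp [h]
    rw [if_neg h0]
    by_cases hn1 : n = 1
    · subst hn1
      have hhk0 : hk = 0 := by omega
      have hlk0 : lk = 0 := by omega
      subst hhk0; subst hlk0
      simp [gimmeScan, PySem.List.pyRange_one_eq_nil]
    · have h1n : (1 : Int) < (n : Int) := by exact_mod_cast (by omega : 1 < n)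
      rw [PySem.List.pyRange_one_cons h1n]
      by_cases h1 : hk ≠ 1 ∧ lk ≠ 1
      · have : ¬((1 : Int) = (hk : Int) ∨ (1 : Int) = (lk : Int)) := by
          push_cast; omega
        simp [gimmeScan, hsk, this, h1, hn1]
      · have hsk1 : ((1 : Int) = (hk : Int) ∨ (1 : Int) = (lk : Int)) := by
          push_cast; omega
        rw [if_neg h1]
        -- here {hk, lk} = {0, 1}
        have hset : (hk = 0 ∧ lk = 1) ∨ (hk = 1 ∧ lk = 0) := by omega
        by_cases hn3 : 3 ≤ n
        · have h2n : ((1 : Int) + 1) < (n : Int) := by exact_mod_cast (by omega : (2:Int) < n)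
          rw [PySem.List.pyRange_one_cons h2n]
          have : ¬((2 : Int) = (hk : Int) ∨ (2 : Int) = (lk : Int)) := by
            omega
          simp [gimmeScan, hsk, hsk1, this, hn3]
        · have hn2 : n = 2 := by omega
          subst hn2
          simp [gimmeScan, hsk, hsk1, PySem.List.pyRange_one_eq_nil, hn3]

-- ===== VERDICT (by name: the statement is the Claim_ definition above) =====
theorem gimme_spec : Claim_equal_gimme := by
  intro array _
  unfold Spec_gimme
  cases array with
  | nil => rfl
  | cons a0 t =>
      obtain ⟨M, m, hk, lk, hfold, hmax, hmin, hhi, hlo⟩ := fold_inv a0 t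
      have hMmem : M ∈ a0 :: t := PySem.List.max?_mem hmax
      have hmmem : m ∈ a0 :: t := PySem.List.min?_mem hmin
      have hMmax : ∀ z ∈ a0 :: t, z ≤ M := fun z hz => PySem.List.max?_isMax hmax z hz
      have hmmin : ∀ z ∈ a0 :: t, m ≤ z := fun z hz => PySem.List.min?_isMin hmin z hz
      -- bounds on the first-occurrence indices
      obtain ⟨hhkb, hgetM, -⟩ := PySem.List.getElem_of_index?_eq_some hhi
      obtain ⟨hlkb, hgetm, -⟩ := PySem.List.getElem_of_index?_eq_some hlo
      -- hk = 0 ↔ a0 = M, and similarly for lk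
      have hk0 : hk = 0 ↔ a0 = M := by
        constructor
        · intro h; subst h; simpa using hgetM
        · intro h
          rw [h, PySem.List.index?_cons_self] at hhi
          exact (Option.some.injEq _ _).mp hhi.symm
      have lk0 : lk = 0 ↔ a0 = m := by
        constructor
        · intro h; subst h; simpa using hgetm
        · intro h
          rw [h, PySem.List.index?_cons_self] at hlo
          exact (Option.some.injEq _ _).mp hlo.symm
      -- B's first condition ↔ a0 is neither the max nor the min value
      have hany1 : ((a0 :: t).any (fun x => decide (a0 < x)) = true) ↔ a0 ≠ M := by
        simp only [List.any_eq_true, decide_eq_true_eq]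
        constructor
        · rintro ⟨z, hz, hlt⟩ hEq; exact absurd (hMmax z hz) (by omega)
        · intro hne; exact ⟨M, hMmem, lt_of_le_of_ne (hMmax a0 (by simp)) hne⟩
      have hany2 : ((a0 :: t).any (fun x => decide (x < a0)) = true) ↔ a0 ≠ m := by
        simp only [List.any_eq_true, decide_eq_true_eq]
        constructor
        · rintro ⟨z, hz, hlt⟩ hEq; exact absurd (hmmin z hz) (by omega)
        · intro hne; exact ⟨m, hmmem, lt_of_le_of_ne (hmmin a0 (by simp)) (Ne.symm hne)⟩
      rw [gimme, hfold]
      simp only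
      rw [gimmeScan_range (a0 :: t).length hk lk hhkb hlkb]
      cases t with
      | nil =>
          have hhk0 : hk = 0 := by simp at hhkb; omega
          have hlk0 : lk = 0 := by simp at hlkb; omega
          simp [gimme_alt, hhk0, hlk0]
      | cons a1 t' =>
          -- hk = 1 ↔ a0 ≠ M ∧ a1 = M, and similarly for lk
          have hk1 : hk = 1 ↔ (a0 ≠ M ∧ a1 = M) := by
            constructor
            · intro h; subst h
              refine ⟨fun hEq => ?_, by simpa using hgetM⟩
              rw [hEq, PySem.List.index?_cons_self] at hhi; simp at hhi
            · rintro ⟨hne, h1⟩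
              rw [PySem.List.index?_cons_of_ne _ hne, ← h1, PySem.List.index?_cons_self] at hhi
              simpa using ((Option.some.injEq _ _).mp hhi).symm
          have lk1 : lk = 1 ↔ (a0 ≠ m ∧ a1 = m) := by
            constructor
            · intro h; subst h
              refine ⟨fun hEq => ?_, by simpa using hgetm⟩
              rw [hEq, PySem.List.index?_cons_self] at hlo; simp at hlo
            · rintro ⟨hne, h1⟩
              rw [PySem.List.index?_cons_of_ne _ hne, ← h1, PySem.List.index?_cons_self] at hlo
              simpa using ((Option.some.injEq _ _).mp hlo).symm
          -- B's ex1 condition ↔ hk = 1 ∨ lk = 1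
          have hex1a : ((decide (a0 < a1) && (a0 :: a1 :: t').all (fun x => decide (x ≤ a1))) = true)
              ↔ hk = 1 := by
            rw [hk1]
            simp only [Bool.and_eq_true, decide_eq_true_eq, List.all_eq_true]
            constructor
            · rintro ⟨hlt, hall⟩
              have h1M : a1 = M :=
                le_antisymm (hMmax a1 (by simp)) (hall M hMmem)
              exact ⟨by omega, h1M⟩
            · rintro ⟨hne, h1⟩
              refine ⟨lt_of_le_of_ne (h1 ▸ hMmax a0 (by simp)) (h1 ▸ hne), ?_⟩
              intro z hz; exact h1 ▸ hMmax z hz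
          have hex1b : ((decide (a1 < a0) && (a0 :: a1 :: t').all (fun x => decide (a1 ≤ x))) = true)
              ↔ lk = 1 := by
            rw [lk1]
            simp only [Bool.and_eq_true, decide_eq_true_eq, List.all_eq_true]
            constructor
            · rintro ⟨hlt, hall⟩
              have h1m : a1 = m :=
                le_antisymm (hall m hmmem) (hmmin a1 (by simp))
              exact ⟨by omega, h1m⟩
            · rintro ⟨hne, h1⟩
              refine ⟨lt_of_le_of_ne (h1 ▸ hmmin a0 (by simp)) (h1 ▸ Ne.symm hne), ?_⟩
              intro z hz; exact h1 ▸ hmmin z hz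
          -- now both sides are the same case analysis
          rw [gimme_alt]
          by_cases hc0 : hk ≠ 0 ∧ lk ≠ 0
          · have : ((a0 :: a1 :: t').any (fun x => decide (a0 < x)) &&
                    (a0 :: a1 :: t').any (fun x => decide (x < a0))) = true := by
              rw [Bool.and_eq_true, hany1, hany2]
              exact ⟨fun h => hc0.1 (hk0.mpr h), fun h => hc0.2 (lk0.mpr h)⟩
            rw [if_pos hc0, this]
            simp
          · have : ((a0 :: a1 :: t').any (fun x => decide (a0 < x)) &&
                    (a0 :: a1 :: t').any (fun x => decide (x < a0))) = false := by
              rw [Bool.and_eq_false_iff]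
              by_cases h : hk = 0
              · left; rw [← Bool.not_eq_true, hany1]; simp [hk0.mp h]
              · right; rw [← Bool.not_eq_true, hany2]
                simp [lk0.mp (by omega : lk = 0)]
            rw [if_neg hc0, this]
            simp only [Bool.false_eq_true, if_false]
            by_cases hc1 : hk ≠ 1 ∧ lk ≠ 1
            · have hex : ((decide (a0 < a1) && (a0 :: a1 :: t').all fun x => decide (x ≤ a1)) ||
                  (decide (a1 < a0) && (a0 :: a1 :: t').all fun x => decide (a1 ≤ x))) = false := by
                rw [Bool.or_eq_false_iff, ← Bool.not_eq_true, ← Bool.not_eq_true, hex1a, hex1b]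
                exact ⟨hc1.1, hc1.2⟩
              rw [if_pos hc1, hex]
              simp
            · have hex : ((decide (a0 < a1) && (a0 :: a1 :: t').all fun x => decide (x ≤ a1)) ||
                  (decide (a1 < a0) && (a0 :: a1 :: t').all fun x => decide (a1 ≤ x))) = true := by
                rw [Bool.or_eq_true, hex1a, hex1b]; omega
              rw [if_neg hc1, hex]
              simp
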